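-- pv_equiv track=rewrite | github.com/flywheel-io/exchange | bin/build_exchange_json.py | group_by_and_sort
-- ===== SOURCE A (Python) =====
-- def group_by_and_sort(l: list[dict]) -> list[dict]:  # noqa
--     l.sort(key=lambda d: d["name"])
--     groups = {}
--     for d in l:
--         groups.setdefault(d.get("name"), []).append(d)
--
--     sorted_l = []
--     for g in groups.values():
--         sorted_l.append(sorted(g, key=lambda v: v["version"], reverse=True))
--     return sorted_l
-- ===== SOURCE B (Python) =====
-- def group_by_and_sort(l: list[dict]) -> list[dict]:  # noqa
--     l.sort(key=lambda d: d["name"])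
--     names = sorted({d["name"] for d in l})
--     return [
--         sorted([d for d in l if d["name"] == name],
--                key=lambda v: v["version"], reverse=True)
--         for name in names
--     ]
-- ===== Notes on version B (the rewrite author's own statement) =====
-- stated objective: alternative
-- what changed: A builds the groups in one pass with a dict of accumulating lists and returns its values; B instead computes the sorted distinct names and builds each group by filtering the name-sorted list per name, sorting each group by version descending.
import Mathlib
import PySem

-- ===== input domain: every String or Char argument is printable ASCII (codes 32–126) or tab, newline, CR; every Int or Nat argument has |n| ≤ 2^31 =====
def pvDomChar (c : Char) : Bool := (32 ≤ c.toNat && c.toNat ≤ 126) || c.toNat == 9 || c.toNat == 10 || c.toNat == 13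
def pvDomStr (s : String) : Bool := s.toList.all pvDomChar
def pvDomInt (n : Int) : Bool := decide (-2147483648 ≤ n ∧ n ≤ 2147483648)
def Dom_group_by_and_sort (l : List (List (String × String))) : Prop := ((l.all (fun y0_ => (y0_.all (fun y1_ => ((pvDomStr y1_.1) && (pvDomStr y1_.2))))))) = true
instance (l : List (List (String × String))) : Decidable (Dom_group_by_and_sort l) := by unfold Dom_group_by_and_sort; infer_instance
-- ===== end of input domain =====

-- B replaces A's one-pass dict accumulation by "sorted distinct names, then one filter+sort per name"
-- (objective: alternative decomposition, not faster). Both A and B sort the argument list in place in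
-- Python; the equivalence proved here is about the RETURN value (the mutation is identical anyway).

-- ===== PORT A =====
-- d["name"] / v["version"]: under Pre_ the key is present, so getD "" is exact there.
def pvName (d : List (String × String)) : String := (PySem.Dict.mk d).getD "name" ""
def pvVersion (d : List (String × String)) : String := (PySem.Dict.mk d).getD "version" ""

def group_by_and_sort (l : List (List (String × String))) : List (List (List (String × String))) :=
  let ls := PySem.List.sorted l pvName
  let groups := ls.foldl
    (fun (g : PySem.Dict (Option String) (List (List (String × String)))) d =>
      g.modify ((PySem.Dict.mk d).get? "name") [] (fun cur => cur ++ [d]))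
    PySem.Dict.empty
  groups.values.foldl (fun acc g => acc ++ [PySem.List.sorted g pvVersion true]) []

-- ===== PORT B =====
def group_by_and_sort_alt (l : List (List (String × String))) : List (List (List (String × String))) :=
  let ls := PySem.List.sorted l pvName
  let names := PySem.List.sorted (PySem.Set.ofList (ls.map pvName)) (fun s => s)
  names.map (fun name =>
    PySem.List.sorted (ls.filter (fun d => pvName d == name)) pvVersion true)

-- ===== PRECONDITION & SPEC =====
-- Pre_ excludes exactly the dicts missing a "name" or "version" key, on which Python A raises KeyError.
def Pre_group_by_and_sort (l : List (List (String × String))) : Prop :=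
  (l.all (fun d => (PySem.Dict.mk d).contains "name" && (PySem.Dict.mk d).contains "version")) = true
instance (l : List (List (String × String))) : Decidable (Pre_group_by_and_sort l) := by
  unfold Pre_group_by_and_sort; infer_instance

def pvWitness_group_by_and_sort : (List (List (String × String))) :=
  [[("name", "b"), ("version", "2")], [("name", "a"), ("version", "1")], [("name", "b"), ("version", "1")]]

def Spec_group_by_and_sort (l : List (List (String × String))) (out : List (List (List (String × String)))) : Prop := out = group_by_and_sort_alt l
instance (l : List (List (String × String))) (out : List (List (List (String × String)))) : Decidable (Spec_group_by_and_sort l out) := by unfold Spec_group_by_and_sort; infer_instance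

-- ===== CLAIM (what is proved, stated in full; the proofs are below) =====
def Claim_equal_group_by_and_sort : Prop := ∀ (l : List (List (String × String))), Dom_group_by_and_sort l → Pre_group_by_and_sort l → Spec_group_by_and_sort l (group_by_and_sort l)

-- ===== LEMMAS AND PROOFS =====

theorem pv_foldl_append_map {α β : Type} (xs : List α) (f : α → β) :
    ∀ acc : List β, xs.foldl (fun a x => a ++ [f x]) acc = acc ++ xs.map f := by
  induction xs with
  | nil => simp
  | cons x xs ih => intro acc; simp [ih]

theorem pv_foldl_modify_pairs (ls : List (List (String × String)))
    (key : List (String × String) → Option String) :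
    ∀ g : PySem.Dict (Option String) (List (List (String × String))),
      ls.foldl (fun g d => g.modify (key d) [] (fun cur => cur ++ [d])) g
        = (ls.map (fun d => (key d, d))).foldl
            (fun g p => g.modify p.1 [] (fun cur => cur ++ [p.2])) g := by
  induction ls with
  | nil => intro g; rfl
  | cons d ls ih => intro g; simp only [List.foldl, List.map]; exact ih _

theorem pv_ofList_sublist {α : Type} [BEq α] [LawfulBEq α] (xs : List α) :
    (PySem.Set.ofList xs).Sublist xs := by
  induction xs with
  | nil => simp [PySem.Set.ofList_nil]
  | cons x xs ih =>
      rw [PySem.Set.ofList_cons]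
      exact List.Sublist.cons₂ x (List.Sublist.trans List.filter_sublist ih)

theorem pv_discard_map_some {α : Type} [BEq α] [LawfulBEq α] (s : List α) (x : α) :
    PySem.Set.discard (s.map some) (some x) = (PySem.Set.discard s x).map some := by
  simp [PySem.Set.discard, List.filter_map, Function.comp_def]

theorem pv_ofList_map_some {α : Type} [BEq α] [LawfulBEq α] (m : List α) :
    PySem.Set.ofList (m.map some) = (PySem.Set.ofList m).map some := by
  induction m with
  | nil => rfl
  | cons x m ih =>
      simp only [List.map, PySem.Set.ofList_cons, ih, pv_discard_map_some]

theorem pv_pairwise_lt_ofList (m : List String)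
    (h : m.Pairwise (fun a b => a ≤ b)) :
    (PySem.Set.ofList m).Pairwise (fun a b => a < b) := by
  have hle := List.Pairwise.sublist (pv_ofList_sublist m) h
  have hnd : (PySem.Set.ofList m).Pairwise (fun a b => a ≠ b) := PySem.Set.nodup_ofList m
  exact (hle.and hnd).imp (fun ⟨h1, h2⟩ => lt_of_le_of_ne h1 h2)

-- ===== VERDICT (by name: the statement is the Claim_ definition above) =====
theorem group_by_and_sort_spec : Claim_equal_group_by_and_sort := by
  intro l _ hpre
  unfold Spec_group_by_and_sort group_by_and_sort group_by_and_sort_alt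
  simp only []
  set ls := PySem.List.sorted l pvName with hls
  have hmem : ∀ d ∈ ls, (PySem.Dict.mk d).get? "name" = some (pvName d) := by
    intro d hd
    have hd' : d ∈ l := (PySem.List.mem_sorted l pvName false d).1 hd
    unfold Pre_group_by_and_sort at hpre
    simp only [List.all_eq_true] at hpre
    have := (hpre d hd')
    have hc : (PySem.Dict.mk d).contains "name" = true := by
      cases Bool.and_eq_true_iff.mp this with | intro a b => exact a
    unfold pvName PySem.Dict.getD
    rcases h : (PySem.Dict.mk d).get? "name" with _ | v
    · have := (PySem.Dict.get?_eq_none_iff_contains (PySem.Dict.mk d) "name").mp h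
      rw [hc] at this; exact absurd this (by simp)
    · rfl
  -- the dict-accumulation side
  set key? : List (String × String) → Option String := fun d => (PySem.Dict.mk d).get? "name" with hkey
  set groups := ls.foldl
      (fun (g : PySem.Dict (Option String) (List (List (String × String)))) d =>
        g.modify (key? d) [] (fun cur => cur ++ [d])) PySem.Dict.empty with hg
  have hkeys : groups.keys = PySem.Set.ofList (ls.map key?) := by
    rw [hg, PySem.Dict.keys_foldl_modify_key ls key? [] (fun _ d cur => cur ++ [d])]
    rfl
  have hnodup : groups.keys.Nodup := by
    rw [hkeys]; exact PySem.Set.nodup_ofList _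
  have hgetD : ∀ k, groups.getD k [] = ls.filter (fun d => key? d == k) := by
    intro k
    rw [hg, pv_foldl_modify_pairs ls key?,
        PySem.Dict.getD_foldl_modify_append (ls.map (fun d => (key? d, d))) PySem.Dict.empty k]
    simp [List.filter_map, Function.comp_def]
  have hvals : groups.values = groups.keys.map (fun k => groups.getD k []) :=
    PySem.Dict.values_eq_map_keys groups hnodup []
  rw [pv_foldl_append_map, List.nil_append, hvals, hkeys, List.map_map]
  -- keys are `some name`
  have hmapkey : ls.map key? = (ls.map pvName).map some := by
    rw [List.map_map]
    exact List.map_congr_left (fun d hd => hmem d hd)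
  rw [hmapkey, pv_ofList_map_some, List.map_map]
  -- the B side: sorted over the already-increasing distinct names is the identity
  have hpw : (ls.map pvName).Pairwise (fun a b => a ≤ b) :=
    PySem.List.sorted_map_key_pairwise l pvName
  have hnames : PySem.List.sorted (PySem.Set.ofList (ls.map pvName)) (fun s => s)
      = PySem.Set.ofList (ls.map pvName) :=
    PySem.List.sorted_eq_of_perm_of_pairwise_lt _ _ _ (List.Perm.refl _)
      (pv_pairwise_lt_ofList _ hpw)
  rw [hnames]
  apply List.map_congr_left
  intro n _
  simp only [Function.comp]
  rw [hgetD (some n)]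
  congr 1
  apply List.filter_congr
  intro d hd
  rw [hkey]
  simp only []
  rw [hmem d hd]
  simp
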